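-- pv_equiv track=rewrite | github.com/SDNNetSim/FUSION | fusion/pipelines/disjoint_path_finder.py | are_link_disjoint
-- ===== SOURCE A (Python) =====
-- def are_link_disjoint(
--     path1: list[str], path2: list[str]
-- ) -> bool:
--     """
--     Check if two paths are link-disjoint.
--
--     :param path1: First path as list of node IDs.
--     :type path1: list[str]
--     :param path2: Second path as list of node IDs.
--     :type path2: list[str]
--     :return: True if paths share no common edges (in either direction).
--     :rtype: bool
--     """
--     edges1 = {(path1[i], path1[i + 1]) for i in range(len(path1) - 1)}
--     edges1.update((path1[i + 1], path1[i]) for i in range(len(path1) - 1))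
--     edges2 = {(path2[i], path2[i + 1]) for i in range(len(path2) - 1)}
--     edges2.update((path2[i + 1], path2[i]) for i in range(len(path2) - 1))
--     return not edges1.intersection(edges2)
-- ===== SOURCE B (Python) =====
-- def are_link_disjoint(
--     path1: list[str], path2: list[str]
-- ) -> bool:
--     """Direct pairwise comparison: for each consecutive edge of path2, scan
--     path1's consecutive edges for a match in either orientation; no sets built."""
--     for a, b in zip(path2, path2[1:]):
--         for c, d in zip(path1, path1[1:]):
--             if (a == c and b == d) or (a == d and b == c):
--                 return False
--     return True
-- ===== Notes on version B (the rewrite author's own statement) =====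
-- stated objective: simpler
-- what changed: B builds no edge sets at all: it compares each consecutive edge of path2 directly against each consecutive edge of path1 (in both orientations) with a short-circuiting nested scan, instead of materialising two bidirectional edge sets and intersecting them.
import Mathlib
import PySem

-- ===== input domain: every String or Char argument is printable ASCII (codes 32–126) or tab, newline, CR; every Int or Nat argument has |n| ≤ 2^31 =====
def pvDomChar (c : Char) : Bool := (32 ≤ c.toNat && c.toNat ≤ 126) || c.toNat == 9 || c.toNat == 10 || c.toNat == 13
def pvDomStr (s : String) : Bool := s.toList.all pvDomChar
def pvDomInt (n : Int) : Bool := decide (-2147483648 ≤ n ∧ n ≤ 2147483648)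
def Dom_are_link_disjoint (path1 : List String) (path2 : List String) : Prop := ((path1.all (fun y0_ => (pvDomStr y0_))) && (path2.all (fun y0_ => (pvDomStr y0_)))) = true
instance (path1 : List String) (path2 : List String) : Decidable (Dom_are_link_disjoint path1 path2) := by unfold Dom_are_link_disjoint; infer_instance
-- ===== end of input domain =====

-- B builds no edge sets: it compares each consecutive edge of path2 directly against each
-- consecutive edge of path1 in both orientations (short-circuiting nested scan), instead of
-- materialising two bidirectional edge sets and intersecting them.


-- ===== PORT A =====
-- A builds, for one path, the set of directed adjacent pairs and updates it with the reversed
-- pairs; indices drawn from range(len-1) are always in range, so pyGetD's default is never used.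
def aEdges (xs : List String) : PySem.Set (String × String) :=
  PySem.Set.update
    (PySem.Set.ofList ((PySem.List.pyRange 0 ((xs.length : Int) - 1)).map
      (fun i => (PySem.List.pyGetD xs i "", PySem.List.pyGetD xs (i + 1) ""))))
    ((PySem.List.pyRange 0 ((xs.length : Int) - 1)).map
      (fun i => (PySem.List.pyGetD xs (i + 1) "", PySem.List.pyGetD xs i "")))

def are_link_disjoint (path1 : List String) (path2 : List String) : Bool :=
  (PySem.Set.inter (aEdges path1) (aEdges path2)).isEmpty

-- ===== PORT B =====
-- zip(xs, xs[1:]) ported as xs.zip (xs.drop 1) (exact: xs[1:] drops the first element);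
-- the nested for-loops with early 'return False' become nested short-circuiting List.any.
def are_link_disjoint_alt (path1 : List String) (path2 : List String) : Bool :=
  !((path2.zip (path2.drop 1)).any (fun p =>
      (path1.zip (path1.drop 1)).any (fun q =>
        (p.1 == q.1 && p.2 == q.2) || (p.1 == q.2 && p.2 == q.1))))

-- ===== PRECONDITION & SPEC =====
def Spec_are_link_disjoint (path1 : List String) (path2 : List String) (out : Bool) : Prop := out = are_link_disjoint_alt path1 path2
instance (path1 : List String) (path2 : List String) (out : Bool) : Decidable (Spec_are_link_disjoint path1 path2 out) := by unfold Spec_are_link_disjoint; infer_instance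

-- ===== CLAIM (what is proved, stated in full; the proofs are below) =====
def Claim_equal_are_link_disjoint : Prop := ∀ (path1 : List String) (path2 : List String), Dom_are_link_disjoint path1 path2 → Spec_are_link_disjoint path1 path2 (are_link_disjoint path1 path2)

-- ===== LEMMAS AND PROOFS =====

-- A's range(len-1) comprehension over adjacent indices is the zip of the list with its tail.
lemma pyAdj_eq {α : Type} (xs : List String) (f : String → String → α) :
    ((PySem.List.pyRange 0 ((xs.length : Int) - 1)).map
      (fun i => f (PySem.List.pyGetD xs i "") (PySem.List.pyGetD xs (i + 1) ""))) =
    (xs.zip (xs.drop 1)).map (fun p => f p.1 p.2) := by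
  cases xs with
  | nil => rfl
  | cons a t =>
    have hlen : ((a :: t).length : Int) - 1 = (t.length : Nat) := by
      simp
    rw [hlen, PySem.List.pyRange_zero_natCast, List.map_map]
    apply List.ext_getElem
    · simp [List.length_zip]
    · intro i h1 h2
      have hi : i < t.length := by simpa using h1
      simp only [List.getElem_map, List.getElem_range, Function.comp_apply]
      have c1 : ((i : Int)) = ((i : Nat) : Int) := rfl
      have c2 : ((i : Int) + 1) = (((i + 1 : Nat)) : Int) := by push_cast; ring
      rw [c1, c2, PySem.List.pyGetD_natCast, PySem.List.pyGetD_natCast]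
      have g1 : (a :: t).getD i "" = (a :: t)[i]'(by simp; omega) := List.getD_eq_getElem _ _ (by simp; omega)
      have g2 : (a :: t).getD (i + 1) "" = (a :: t)[i + 1]'(by simp; omega) := List.getD_eq_getElem _ _ (by simp; omega)
      rw [g1, g2]
      simp [List.getElem_zip]

lemma mem_aEdges (xs : List String) (x : String × String) :
    x ∈ aEdges xs ↔ x ∈ xs.zip (xs.drop 1) ∨ (x.2, x.1) ∈ xs.zip (xs.drop 1) := by
  unfold aEdges
  rw [PySem.Set.mem_update, PySem.Set.mem_ofList,
      pyAdj_eq xs (fun a b => (a, b)), pyAdj_eq xs (fun a b => (b, a))]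
  simp only [List.mem_map]
  constructor
  · rintro (⟨p, hp, rfl⟩ | ⟨p, hp, rfl⟩)
    · exact Or.inl hp
    · exact Or.inr hp
  · rintro (h | h)
    · exact Or.inl ⟨x, h, rfl⟩
    · exact Or.inr ⟨(x.2, x.1), h, rfl⟩

-- a common element of the two bidirectional edge sets exists iff some edge of path2 matches
-- some edge of path1 in one of the two orientations
lemma exists_shared (P1 P2 : List (String × String)) :
    (∃ x : String × String, (x ∈ P1 ∨ (x.2, x.1) ∈ P1) ∧ (x ∈ P2 ∨ (x.2, x.1) ∈ P2)) ↔
    (∃ p ∈ P2, ∃ q ∈ P1, (p.1 = q.1 ∧ p.2 = q.2) ∨ (p.1 = q.2 ∧ p.2 = q.1)) := by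
  constructor
  · rintro ⟨⟨a, b⟩, h1 | h1, h2 | h2⟩
    · exact ⟨(a, b), h2, (a, b), h1, Or.inl ⟨rfl, rfl⟩⟩
    · exact ⟨(b, a), h2, (a, b), h1, Or.inr ⟨rfl, rfl⟩⟩
    · exact ⟨(a, b), h2, (b, a), h1, Or.inr ⟨rfl, rfl⟩⟩
    · exact ⟨(b, a), h2, (b, a), h1, Or.inl ⟨rfl, rfl⟩⟩
  · rintro ⟨⟨a, b⟩, hp, ⟨c, d⟩, hq, ⟨h1, h2⟩ | ⟨h1, h2⟩⟩
    · subst h1; subst h2; exact ⟨(a, b), Or.inl hq, Or.inl hp⟩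
    · subst h1; subst h2; exact ⟨(a, b), Or.inr hq, Or.inl hp⟩

lemma altB_false (path1 path2 : List String) :
    are_link_disjoint_alt path1 path2 = false ↔
    ∃ p ∈ path2.zip (path2.drop 1), ∃ q ∈ path1.zip (path1.drop 1),
      (p.1 = q.1 ∧ p.2 = q.2) ∨ (p.1 = q.2 ∧ p.2 = q.1) := by
  simp [are_link_disjoint_alt, List.any_eq_true]

lemma aA_false (path1 path2 : List String) :
    are_link_disjoint path1 path2 = false ↔
    ∃ x : String × String, x ∈ aEdges path1 ∧ x ∈ aEdges path2 := by
  unfold are_link_disjoint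
  rw [Bool.eq_false_iff, ne_eq, List.isEmpty_iff]
  constructor
  · intro h
    obtain ⟨x, hx⟩ := List.exists_mem_of_ne_nil _ h
    exact ⟨x, (PySem.Set.mem_inter _ _ _).mp hx⟩
  · rintro ⟨x, hx⟩ hnil
    exact absurd (hnil ▸ (PySem.Set.mem_inter _ _ _).mpr hx) (List.not_mem_nil)

lemma main_eq (path1 path2 : List String) :
    are_link_disjoint path1 path2 = are_link_disjoint_alt path1 path2 := by
  have hiff : are_link_disjoint path1 path2 = false ↔ are_link_disjoint_alt path1 path2 = false := by
    rw [aA_false, altB_false]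
    simp_rw [mem_aEdges]
    exact exists_shared _ _
  cases hA : are_link_disjoint path1 path2 <;> cases hB : are_link_disjoint_alt path1 path2 <;>
    simp_all

-- ===== VERDICT (by name: the statement is the Claim_ definition above) =====
theorem are_link_disjoint_spec : Claim_equal_are_link_disjoint := by
  intro path1 path2 _
  exact main_eq path1 path2
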